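-- pv_equiv track=rewrite | github.com/zurukumo/atcoder | abc031/d.py | spl
-- ===== SOURCE A (Python) =====
-- def spl(s, n):
--     if n == 0:
--         return [[]]
--
--     ret = []
--
--     m = max(len(s) - 3 * (n - 1), 1)
--     M = min(len(s) - (n - 1), 3)
--     for i in range(m, M + 1):
--         for t in spl(s[i:], n - 1):
--             ret.append([s[:i]] + t)
--
--     return ret
-- ===== SOURCE B (Python) =====
-- def spl(s, n):
--     # Iterative worklist over the number of parts instead of recursion.
--     if n == 0:
--         return [[]]
--     if n < 0:
--         return []
--     partials = [(0, [])]
--     for _ in range(n):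
--         if not partials:
--             break
--         nxt = []
--         for pos, parts in partials:
--             for l in (1, 2, 3):
--                 if pos + l <= len(s):
--                     nxt.append((pos + l, parts + [s[pos:pos + l]]))
--         partials = nxt
--     return [parts for pos, parts in partials if pos == len(s)]
-- ===== Notes on version B (the rewrite author's own statement) =====
-- stated objective: alternative
-- what changed: A's pruned top-down recursion over the first piece is replaced by an iterative breadth-first worklist: n rounds each extend every partial (pos, parts) by a piece of length 1, 2, 3, and the splits that reach the end of the string are collected at the end.
import Mathlib
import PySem

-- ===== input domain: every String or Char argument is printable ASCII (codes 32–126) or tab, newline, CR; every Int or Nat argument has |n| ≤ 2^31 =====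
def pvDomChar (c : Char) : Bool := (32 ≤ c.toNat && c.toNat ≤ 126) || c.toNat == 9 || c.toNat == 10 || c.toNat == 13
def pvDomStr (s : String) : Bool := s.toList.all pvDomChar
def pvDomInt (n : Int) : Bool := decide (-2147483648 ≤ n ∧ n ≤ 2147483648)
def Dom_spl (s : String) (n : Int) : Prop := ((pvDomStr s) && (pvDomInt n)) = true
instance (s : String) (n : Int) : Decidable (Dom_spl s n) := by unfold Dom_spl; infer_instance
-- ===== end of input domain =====

-- B replaces A's pruned recursion by an iterative breadth-first worklist over the number of
-- parts (objective: alternative decomposition; same results in the same order).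

-- ===== PORT A =====
-- literal port of A: recursion on the suffix string, first-piece length i ranging over the
-- pruned interval [m, M]; `ret.append` becomes a foldl over the range (attached for termination)
def spl (s : String) (n : Int) : List (List String) :=
  if n = 0 then [[]]
  else
    let m := max (PySem.Str.len s - 3 * (n - 1)) 1
    let M := min (PySem.Str.len s - (n - 1)) 3
    (PySem.List.pyRange m (M + 1) 1).attach.foldl
      (fun ret i =>
        ret ++ (spl (PySem.Str.slice s (some i.1) none) (n - 1)).map
          (fun t => PySem.Str.slice s none (some i.1) :: t)) []
termination_by n.toNat
decreasing_by
  have h := (PySem.List.mem_pyRange_one).1 i.2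
  simp only at h
  omega

-- ===== PORT B =====
-- one worklist round: extend every partial (pos, parts) by a piece of length 1, 2, 3
def splStep (s : String) (partials : List (Int × List String)) : List (Int × List String) :=
  partials.foldl
    (fun nxt pp =>
      ([(1 : Int), 2, 3]).foldl
        (fun nxt2 l =>
          if pp.1 + l ≤ PySem.Str.len s then
            nxt2 ++ [(pp.1 + l, pp.2 ++ [PySem.Str.slice s (some pp.1) (some (pp.1 + l))])]
          else nxt2)
        nxt)
    []

-- the `for _ in range(n): if not partials: break; …` loop, with the round count as fuel
def splLoop (s : String) (fuel : Nat) (st : List (Int × List String)) : List (Int × List String) :=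
  match fuel with
  | 0 => st
  | f + 1 => if st = [] then st else splLoop s f (splStep s st)

def spl_alt (s : String) (n : Int) : List (List String) :=
  if n = 0 then [[]]
  else if n < 0 then []
  else
    let partials := splLoop s n.toNat [((0 : Int), ([] : List String))]
    partials.foldl (fun acc pp => if pp.1 = PySem.Str.len s then acc ++ [pp.2] else acc) []

-- ===== PRECONDITION & SPEC =====
def Spec_spl (s : String) (n : Int) (out : List (List String)) : Prop := out = spl_alt s n
instance (s : String) (n : Int) (out : List (List String)) : Decidable (Spec_spl s n out) := by unfold Spec_spl; infer_instance

-- ===== CLAIM (what is proved, stated in full; the proofs are below) =====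
def Claim_equal_spl : Prop := ∀ (s : String) (n : Int), Dom_spl s n → Spec_spl s n (spl s n)

-- ===== LEMMAS AND PROOFS =====

-- the one-piece extension of a single partial, as filter+map
def ext1 (s : String) (pp : Int × List String) : List (Int × List String) :=
  (([(1 : Int), 2, 3]).filter (fun l => decide (pp.1 + l ≤ PySem.Str.len s))).map
    (fun l => (pp.1 + l, pp.2 ++ [PySem.Str.slice s (some pp.1) (some (pp.1 + l))]))

def stepF (s : String) (st : List (Int × List String)) : List (Int × List String) :=
  st.flatMap (ext1 s)

-- reference function: all splits of s[pos:len] into exactly k pieces of length 1..3,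
-- pieces written as slices of s, in ascending-first-length order
def T (s : String) (pos : Int) : Nat → List (List String)
  | 0 => if pos = PySem.Str.len s then [[]] else []
  | k + 1 =>
    (([(1 : Int), 2, 3]).filter (fun l => decide (pos + l ≤ PySem.Str.len s))).flatMap
      (fun l => (T s (pos + l) k).map
        (fun t => PySem.Str.slice s (some pos) (some (pos + l)) :: t))

-- the final comprehension of B
def FE (s : String) (st : List (Int × List String)) : List (List String) :=
  (st.filter (fun pp => decide (pp.1 = PySem.Str.len s))).map Prod.snd

lemma splStep_eq (s : String) (st : List (Int × List String)) :
    splStep s st = stepF s st := by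
  unfold splStep stepF
  rw [PySem.List.foldl_congr_mem st _ (fun nxt pp => nxt ++ ext1 s pp) []
    (fun nxt pp _ => PySem.List.foldl_append_ite
      (p := fun l => pp.1 + l ≤ PySem.Str.len s)
      (f := fun l => (pp.1 + l, pp.2 ++ [PySem.Str.slice s (some pp.1) (some (pp.1 + l))]))
      (l := [(1 : Int), 2, 3]) (acc := nxt))]
  simpa using PySem.List.foldl_append_eq_flatMap (g := ext1 s) (l := st) (acc := [])

lemma stepF_append (s : String) (a b : List (Int × List String)) :
    stepF s (a ++ b) = stepF s a ++ stepF s b := by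
  simp [stepF]

lemma stepF_iter_append (s : String) (k : Nat) (a b : List (Int × List String)) :
    (stepF s)^[k] (a ++ b) = (stepF s)^[k] a ++ (stepF s)^[k] b := by
  induction k generalizing a b with
  | zero => simp
  | succ k ih =>
    simp only [Function.iterate_succ_apply, stepF_append]
    exact ih _ _

-- translation by a fixed prefix of parts commutes with the step
def trP (parts : List String) (pp : Int × List String) : Int × List String :=
  (pp.1, parts ++ pp.2)

lemma ext1_trP (s : String) (parts : List String) (pp : Int × List String) :
    ext1 s (trP parts pp) = (ext1 s pp).map (trP parts) := by
  simp [ext1, trP, List.map_map]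

lemma stepF_map_trP (s : String) (parts : List String) (st : List (Int × List String)) :
    stepF s (st.map (trP parts)) = (stepF s st).map (trP parts) := by
  simp [stepF, List.flatMap_map, List.map_flatMap, ext1_trP]

lemma stepF_iter_map_trP (s : String) (parts : List String) (k : Nat)
    (st : List (Int × List String)) :
    (stepF s)^[k] (st.map (trP parts)) = ((stepF s)^[k] st).map (trP parts) := by
  induction k generalizing st with
  | zero => simp
  | succ k ih => simp [Function.iterate_succ_apply, stepF_map_trP, ih]

lemma FE_append (s : String) (a b : List (Int × List String)) :
    FE s (a ++ b) = FE s a ++ FE s b := by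
  simp [FE]

lemma FE_map_trP (s : String) (parts : List String) (st : List (Int × List String)) :
    FE s (st.map (trP parts)) = (FE s st).map (fun t => parts ++ t) := by
  simp [FE, List.filter_map, List.map_map]
  rfl

lemma stepF_iter_flatMap_singles (s : String) (k : Nat) (xs : List (Int × List String)) :
    (stepF s)^[k] xs = xs.flatMap (fun pp => (stepF s)^[k] [pp]) := by
  induction xs with
  | nil =>
    induction k with
    | zero => simp
    | succ k ih => simp [Function.iterate_succ_apply, stepF, ih]
  | cons x xs ih =>
    have hx : x :: xs = [x] ++ xs := rfl
    rw [hx, stepF_iter_append, ih]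
    simp

-- B's worklist after k rounds, filtered at the end, computes T
lemma FE_iter_eq_T (s : String) (k : Nat) (pos : Int) :
    FE s ((stepF s)^[k] [(pos, ([] : List String))]) = T s pos k := by
  induction k generalizing pos with
  | zero =>
    simp only [Function.iterate_zero, id_eq, FE, T]
    by_cases h : pos = PySem.Str.len s <;> simp [PySem.Str.len_eq] at h ⊢ <;> simp [h]
  | succ k ih =>
    rw [Function.iterate_succ_apply]
    have hstep : stepF s [(pos, ([] : List String))] = ext1 s (pos, []) := by
      simp [stepF]
    rw [hstep]
    unfold ext1
    rw [stepF_iter_flatMap_singles]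
    simp only [List.flatMap_map, List.nil_append]
    have hFE : ∀ l : Int,
        FE s ((stepF s)^[k]
          [(pos + l, [PySem.Str.slice s (some pos) (some (pos + l))])]) =
        (T s (pos + l) k).map
          (fun t => PySem.Str.slice s (some pos) (some (pos + l)) :: t) := by
      intro l
      have h1 : ([((pos + l : Int), [PySem.Str.slice s (some pos) (some (pos + l))])])
          = ([((pos + l : Int), ([] : List String))]).map
              (trP [PySem.Str.slice s (some pos) (some (pos + l))]) := by
        simp [trP]
      rw [h1, stepF_iter_map_trP, FE_map_trP, ih]
      simp
    have hflat : ∀ (L : List Int),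
        FE s (L.flatMap (fun l => (stepF s)^[k]
            [(pos + l, [PySem.Str.slice s (some pos) (some (pos + l))])])) =
        L.flatMap (fun l => (T s (pos + l) k).map
            (fun t => PySem.Str.slice s (some pos) (some (pos + l)) :: t)) := by
      intro L
      induction L with
      | nil => simp [FE]
      | cons a L ihL => simp only [List.flatMap_cons, FE_append, ihL, hFE]
    rw [hflat]
    rfl

-- T is empty when the remaining length cannot be covered by exactly k pieces of length 1..3
lemma T_empty (s : String) (k : Nat) (pos : Int)
    (h : PySem.Str.len s - pos < k ∨ 3 * k < PySem.Str.len s - pos) :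
    T s pos k = [] := by
  induction k generalizing pos with
  | zero =>
    have h0 : T s pos 0 = if pos = PySem.Str.len s then [[]] else [] := rfl
    rw [h0, if_neg (show ¬ pos = PySem.Str.len s by omega)]
  | succ k ih =>
    unfold T
    apply List.flatMap_eq_nil_iff.2
    intro l hl
    have hmem := List.mem_filter.1 hl
    have hl3 : l = 1 ∨ l = 2 ∨ l = 3 := by simpa using hmem.1
    have hle : pos + l ≤ PySem.Str.len s := by
      have := hmem.2; simpa using this
    have hT : T s (pos + l) k = [] := by
      apply ih
      push_cast at h ⊢
      omega
    simp [hT]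

-- generic: two filters of the same list give the same flatMap when the first keeps
-- a subset of the second and g vanishes on the difference
lemma flatMap_filter_eq {α β : Type} (l : List α) (p q : α → Bool) (g : α → List β)
    (h1 : ∀ x ∈ l, p x = true → q x = true)
    (h2 : ∀ x ∈ l, q x = true → p x = false → g x = []) :
    (l.filter p).flatMap g = (l.filter q).flatMap g := by
  induction l with
  | nil => simp
  | cons a l ih =>
    have ih' := ih (fun x hx => h1 x (List.mem_cons_of_mem a hx))
      (fun x hx => h2 x (List.mem_cons_of_mem a hx))
    by_cases hp : p a = true
    · have hq := h1 a List.mem_cons_self hp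
      simp [hp, hq, ih']
    · have hp' : p a = false := by simpa using hp
      by_cases hq : q a = true
      · have hg := h2 a List.mem_cons_self hq hp'
        simp [hp', hq, hg, ih']
      · have hq' : q a = false := by simpa using hq
        simp [hp', hq', ih']

-- the pruned range of A, rewritten as a filter of [1,2,3]
lemma pyRange_eq_filter (m M : Int) (hm : 1 ≤ m) (hM : M ≤ 3) :
    PySem.List.pyRange m (M + 1) 1 =
      ([(1 : Int), 2, 3]).filter (fun i => decide (m ≤ i ∧ i ≤ M)) := by
  by_cases h : m ≤ M
  · have hm3 : m ≤ 3 := le_trans h hM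
    have hM1 : 1 ≤ M := le_trans hm h
    interval_cases m <;> interval_cases M <;>
      simp [PySem.List.pyRange_one_cons, PySem.List.pyRange_one_eq_nil, List.filter]
  · rw [PySem.List.pyRange_one_eq_nil (by omega)]
    symm
    apply List.filter_eq_nil_iff.2
    intro a _
    simp only [decide_eq_true_eq, not_and]
    omega

-- suffix slices compose
lemma toList_slice_from (s : String) (pos : Int) (hpos : 0 ≤ pos) :
    (PySem.Str.slice s (some pos) none).toList = s.toList.drop pos.toNat := by
  rw [PySem.Str.toList_slice]
  exact PySem.List.slice_from _ hpos

lemma len_slice_from (s : String) (pos : Int) (hpos : 0 ≤ pos) (hle : pos ≤ PySem.Str.len s) :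
    PySem.Str.len (PySem.Str.slice s (some pos) none) = PySem.Str.len s - pos := by
  rw [PySem.Str.len_eq, PySem.Str.len_eq] at *
  rw [toList_slice_from s pos hpos]
  simp only [List.length_drop]
  omega

lemma slice_from_from (s : String) (pos i : Int) (hpos : 0 ≤ pos) (hi : 0 ≤ i) :
    PySem.Str.slice (PySem.Str.slice s (some pos) none) (some i) none =
      PySem.Str.slice s (some (pos + i)) none := by
  apply String.toList_inj.mp
  rw [toList_slice_from _ i hi, toList_slice_from s pos hpos,
      toList_slice_from s (pos + i) (by omega), List.drop_drop]
  congr 1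
  omega

lemma slice_from_to (s : String) (pos i : Int) (hpos : 0 ≤ pos) (hi : 0 ≤ i) :
    PySem.Str.slice (PySem.Str.slice s (some pos) none) none (some i) =
      PySem.Str.slice s (some pos) (some (pos + i)) := by
  apply String.toList_inj.mp
  simp only [PySem.Str.toList_slice, PySem.Chars.slice_eq_listSlice]
  rw [PySem.List.slice_to _ hi, PySem.List.slice_from _ hpos,
    PySem.List.slice_toNat _ hpos (by omega)]
  congr 1
  omega

-- unfolding A's recursion into a flatMap over the pruned range
lemma spl_eq (s : String) (n : Int) (hn : n ≠ 0) :
    spl s n =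
      (PySem.List.pyRange (max (PySem.Str.len s - 3 * (n - 1)) 1)
          ((min (PySem.Str.len s - (n - 1)) 3) + 1) 1).flatMap
        (fun i => (spl (PySem.Str.slice s (some i) none) (n - 1)).map
          (fun t => PySem.Str.slice s none (some i) :: t)) := by
  rw [spl]
  simp only [hn, if_false]
  rw [List.foldl_attach (f := fun (ret : List (List String)) (i : Int) =>
    ret ++ (spl (PySem.Str.slice s (some i) none) (n - 1)).map
      (fun t => PySem.Str.slice s none (some i) :: t))]
  simpa using PySem.List.foldl_append_eq_flatMap
    (g := fun i => (spl (PySem.Str.slice s (some i) none) (n - 1)).map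
      (fun t => PySem.Str.slice s none (some i) :: t))
    (l := PySem.List.pyRange (max (PySem.Str.len s - 3 * (n - 1)) 1)
      ((min (PySem.Str.len s - (n - 1)) 3) + 1) 1) (acc := [])

lemma spl_zero (s : String) : spl s 0 = [[]] := by
  rw [spl]
  simp

lemma str_len_nonneg (s : String) : 0 ≤ PySem.Str.len s := by
  rw [PySem.Str.len_eq]; positivity

-- A computes T on every suffix, for at least one part
lemma spl_eq_T (s : String) (k : Nat) (pos : Int) (hpos : 0 ≤ pos)
    (hle : pos ≤ PySem.Str.len s) :
    spl (PySem.Str.slice s (some pos) none) ((k : Int) + 1) = T s pos (k + 1) := by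
  induction k generalizing pos with
  | zero =>
    rw [spl_eq _ _ (by norm_num), len_slice_from s pos hpos hle]
    have ha : ((0 : Nat) : Int) + 1 - 1 = 0 := by norm_num
    rw [ha]
    simp only [mul_zero, sub_zero]
    rw [pyRange_eq_filter _ _ (by omega) (by omega)]
    rw [List.flatMap_congr (l := ([(1 : Int), 2, 3]).filter
          (fun i => decide (max (PySem.Str.len s - pos) 1 ≤ i ∧ i ≤ min (PySem.Str.len s - pos) 3)))
        (g := fun i => (T s (pos + i) 0).map
          (fun t => PySem.Str.slice s (some pos) (some (pos + i)) :: t))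
        (by
          intro i hi
          have hmem := List.mem_filter.1 hi
          have hp1 : max (PySem.Str.len s - pos) 1 ≤ i ∧ i ≤ min (PySem.Str.len s - pos) 3 := by
            simpa using hmem.2
          have h0i : (0 : Int) ≤ i := by omega
          have hir : i = PySem.Str.len s - pos := by omega
          rw [slice_from_from s pos i hpos h0i, slice_from_to s pos i hpos h0i, spl_zero]
          have hT : T s (pos + i) 0 = [[]] := by
            have hpi : pos + i = PySem.Str.len s := by omega
            have h0 : T s (pos + i) 0 = if pos + i = PySem.Str.len s then [[]] else [] := rfl
            rw [h0, if_pos hpi]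
          simp [hT])]
    rw [flatMap_filter_eq _ _ (fun l => decide (pos + l ≤ PySem.Str.len s)) _
        (by
          intro x _
          simp only [decide_eq_true_eq]
          omega)
        (by
          intro x hx hq hp
          have hx3 : x = 1 ∨ x = 2 ∨ x = 3 := by simpa using hx
          simp only [decide_eq_true_eq] at hq
          simp only [decide_eq_false_iff_not, not_and] at hp
          have hT : T s (pos + x) 0 = [] := T_empty s 0 (pos + x) (by push_cast; omega)
          rw [hT, List.map_nil])]
    rfl
  | succ k ih =>
    rw [spl_eq _ _ (by push_cast; omega), len_slice_from s pos hpos hle]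
    have ha : ((k + 1 : Nat) : Int) + 1 - 1 = (k : Int) + 1 := by push_cast; ring
    rw [ha]
    rw [pyRange_eq_filter _ _ (by omega) (by omega)]
    rw [List.flatMap_congr (l := ([(1 : Int), 2, 3]).filter
          (fun i => decide (max (PySem.Str.len s - pos - 3 * ((k : Int) + 1)) 1 ≤ i ∧
            i ≤ min (PySem.Str.len s - pos - ((k : Int) + 1)) 3)))
        (g := fun i => (T s (pos + i) (k + 1)).map
          (fun t => PySem.Str.slice s (some pos) (some (pos + i)) :: t))
        (by
          intro i hi
          have hmem := List.mem_filter.1 hi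
          have hp1 : max (PySem.Str.len s - pos - 3 * ((k : Int) + 1)) 1 ≤ i ∧
              i ≤ min (PySem.Str.len s - pos - ((k : Int) + 1)) 3 := by
            simpa using hmem.2
          have h0i : (0 : Int) ≤ i := by omega
          rw [slice_from_from s pos i hpos h0i, slice_from_to s pos i hpos h0i,
            ih (pos + i) (by omega) (by omega)])]
    rw [flatMap_filter_eq _ _ (fun l => decide (pos + l ≤ PySem.Str.len s)) _
        (by
          intro x _
          simp only [decide_eq_true_eq]
          omega)
        (by
          intro x hx hq hp
          have hx3 : x = 1 ∨ x = 2 ∨ x = 3 := by simpa using hx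
          simp only [decide_eq_true_eq] at hq
          simp only [decide_eq_false_iff_not, not_and] at hp
          have hT : T s (pos + x) (k + 1) = [] := by
            apply T_empty
            push_cast
            omega
          rw [hT, List.map_nil])]
    rfl

-- B's loop shape: for n ≥ 1, spl_alt is the filtered n-fold worklist
lemma splLoop_eq_iter (s : String) (k : Nat) (st : List (Int × List String)) :
    splLoop s k st = (stepF s)^[k] st := by
  induction k generalizing st with
  | zero => rfl
  | succ k ih =>
    rw [splLoop]
    by_cases h : st = []
    · subst h
      rw [if_pos rfl, Function.iterate_fixed (by simp [stepF])]
    · rw [if_neg h, ih, splStep_eq, Function.iterate_succ_apply]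

lemma spl_alt_eq_FE (s : String) (n : Int) (hn : 1 ≤ n) :
    spl_alt s n = FE s ((stepF s)^[n.toNat] [((0 : Int), ([] : List String))]) := by
  rw [spl_alt, if_neg (by omega), if_neg (by omega)]
  rw [splLoop_eq_iter]
  simpa [FE] using PySem.List.foldl_append_ite
    (p := fun pp : Int × List String => pp.1 = PySem.Str.len s)
    (f := Prod.snd)
    (l := (stepF s)^[n.toNat] [((0 : Int), ([] : List String))]) (acc := [])

lemma slice_from_zero (s : String) : PySem.Str.slice s (some 0) none = s := by
  apply String.toList_inj.mp
  rw [toList_slice_from s 0 le_rfl]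
  simp

-- ===== VERDICT (by name: the statement is the Claim_ definition above) =====
theorem spl_spec : Claim_equal_spl := by
  intro s n _
  unfold Spec_spl
  rcases lt_trichotomy n 0 with hn | hn | hn
  · -- n < 0: A's pruned range is empty, B returns [] by its guard
    have hL := str_len_nonneg s
    rw [spl_eq _ _ (by omega), spl_alt, if_neg (by omega), if_pos hn]
    rw [PySem.List.pyRange_one_eq_nil (by omega)]
    simp
  · subst hn
    rw [spl_zero, spl_alt]
    norm_num
  · have h1 : n = ((n.toNat - 1 : Nat) : Int) + 1 := by omega
    have h2 : spl s n = T s 0 n.toNat := by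
      conv_lhs => rw [show s = PySem.Str.slice s (some 0) none from (slice_from_zero s).symm, h1]
      rw [spl_eq_T s (n.toNat - 1) 0 le_rfl (str_len_nonneg s)]
      congr 1
      omega
    rw [h2, spl_alt_eq_FE s n hn, FE_iter_eq_T]
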